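-- pv_equiv track=rewrite | github.com/phreed/meso-forge | .scripts/fix_recipe_indentation.py | fix_yaml_indentation
-- ===== SOURCE A (Python) =====
-- def fix_yaml_indentation(content: str) -> str:
--     """
--     Fix YAML indentation to use consistent 2-space indentation.
--     Uses a stack-based approach to track indentation context.
--     """
--     lines = content.split('\n')
--     fixed_lines = []
--     indent_stack = [0]  # Stack to track indentation levels
--
--     for line in lines:
--         if not line.strip():  # Empty line
--             fixed_lines.append('')
--             continue
--
--         # Count leading spaces
--         leading_spaces = len(line) - len(line.lstrip(' '))
--         stripped_line = line.lstrip()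
--
--         if leading_spaces == 0:  # Top-level keys
--             indent_stack = [0]
--             fixed_lines.append(line)
--         else:
--             # Determine the correct indentation level
--             if stripped_line.startswith('- '):  # List item
--                 # List items should be at the same level as their parent or one level deeper
--                 if leading_spaces > indent_stack[-1]:
--                     # New list, one level deeper than current
--                     new_level = len(indent_stack)
--                     indent_stack.append(new_level * 2)
--                 elif leading_spaces == indent_stack[-1]:
--                     # Same level list item
--                     new_level = len(indent_stack) - 1
--                 else:
--                     # Pop stack until we find appropriate level
--                     while len(indent_stack) > 1 and leading_spaces < indent_stack[-1]:
--                         indent_stack.pop()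
--                     new_level = len(indent_stack) - 1
--             else:
--                 # Regular key-value pairs
--                 if leading_spaces > indent_stack[-1]:
--                     # Deeper level
--                     new_level = len(indent_stack)
--                     indent_stack.append(new_level * 2)
--                 elif leading_spaces == indent_stack[-1]:
--                     # Same level
--                     new_level = len(indent_stack) - 1
--                 else:
--                     # Pop stack until we find appropriate level
--                     while len(indent_stack) > 1 and leading_spaces < indent_stack[-1]:
--                         indent_stack.pop()
--                     new_level = len(indent_stack) - 1
--
--             # Create properly indented line with 2 spaces per level
--             proper_indent = '  ' * new_level
--             fixed_line = proper_indent + stripped_line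
--             fixed_lines.append(fixed_line)
--
--     return '\n'.join(fixed_lines)
-- ===== SOURCE B (Python) =====
-- def fix_yaml_indentation(content: str) -> str:
--     """Closed-form recurrence instead of a stack: the previous level determines
--     the new one directly (prev+1 when indented deeper, else n//2), so the
--     pop-while loop and the three-way branch disappear."""
--     out = []
--     prev = 0
--     for line in content.split('\n'):
--         if not line.strip():
--             out.append('')
--             continue
--         n = len(line) - len(line.lstrip(' '))
--         if n == 0:
--             prev = 0
--             out.append(line)
--             continue
--         prev = prev + 1 if n > 2 * prev else n // 2
--         out.append('  ' * prev + line.lstrip())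
--     return '\n'.join(out)
-- ===== Notes on version B (the rewrite author's own statement) =====
-- stated objective: simpler
-- what changed: Replaces A's indentation stack and its pop-while loop with a closed-form recurrence on a single previous-level integer: the new level is prev+1 when the line is indented deeper and n//2 otherwise, eliminating the stack, the inner while loop and the duplicated list-item/key-value branches.
import Mathlib
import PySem

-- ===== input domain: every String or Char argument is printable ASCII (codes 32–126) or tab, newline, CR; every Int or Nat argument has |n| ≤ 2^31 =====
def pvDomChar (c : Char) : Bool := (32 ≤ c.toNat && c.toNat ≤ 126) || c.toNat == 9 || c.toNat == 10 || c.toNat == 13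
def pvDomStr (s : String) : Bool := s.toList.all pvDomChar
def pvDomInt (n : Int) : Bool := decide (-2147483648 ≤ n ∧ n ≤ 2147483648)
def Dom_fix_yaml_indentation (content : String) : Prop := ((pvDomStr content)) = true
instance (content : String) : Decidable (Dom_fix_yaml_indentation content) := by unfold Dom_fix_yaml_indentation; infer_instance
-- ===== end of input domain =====

-- B replaces A's indentation stack and its pop-while by a closed-form recurrence on one
-- previous-level integer (prev+1 when deeper, else n//2); objective: simpler, same cost.

-- ===== PORT A =====

-- while len(indent_stack) > 1 and leading_spaces < indent_stack[-1]: indent_stack.pop()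
-- (stack kept top-at-head, so pop = drop the head; 'len > 1' = at least two elements)
def pvPopStackA (leading : Int) : List Int → List Int
  | a :: b :: rest => if leading < a then pvPopStackA leading (b :: rest) else a :: b :: rest
  | s => s

-- the body of A's 'for line in lines' loop; state = (fixed_lines, indent_stack)
def pvStepA (acc : List (List Char) × List Int) (line : List Char) : List (List Char) × List Int :=
  if PySem.Chars.strip line = [] then (acc.1 ++ [[]], acc.2) else
  -- len(line) - len(line.lstrip(' ')): lstrip(' ') drops exactly the leading ' ' chars (exact)
  let leading : Int := PySem.Chars.len line - PySem.Chars.len (line.dropWhile (fun c => c == ' '))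
  let stripped := PySem.Chars.lstrip line
  if leading = 0 then (acc.1 ++ [line], [0]) else
  let r : Int × List Int :=
    if PySem.Chars.startswith stripped ['-', ' '] then
      if leading > acc.2.headD 0 then ((acc.2.length : Int), ((acc.2.length : Int) * 2) :: acc.2)
      else if leading = acc.2.headD 0 then ((acc.2.length : Int) - 1, acc.2)
      else
        let s := pvPopStackA leading acc.2
        ((s.length : Int) - 1, s)
    else
      if leading > acc.2.headD 0 then ((acc.2.length : Int), ((acc.2.length : Int) * 2) :: acc.2)
      else if leading = acc.2.headD 0 then ((acc.2.length : Int) - 1, acc.2)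
      else
        let s := pvPopStackA leading acc.2
        ((s.length : Int) - 1, s)
  (acc.1 ++ [PySem.List.pyRepeat [' ', ' '] r.1 ++ stripped], r.2)

def fix_yaml_indentation (content : String) : String :=
  let lines := PySem.Chars.splitOn content.toList ['\n']
  let r := lines.foldl pvStepA ([], [0])
  String.mk (PySem.Chars.join ['\n'] r.1)

-- ===== PORT B =====

-- the body of B's loop; state = (out, prev)
def pvStepB (acc : List (List Char) × Int) (line : List Char) : List (List Char) × Int :=
  if PySem.Chars.strip line = [] then (acc.1 ++ [[]], acc.2) else
  -- len(line) - len(line.lstrip(' ')): lstrip(' ') drops exactly the leading ' ' chars (exact)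
  let n : Int := PySem.Chars.len line - PySem.Chars.len (line.dropWhile (fun c => c == ' '))
  if n = 0 then (acc.1 ++ [line], 0) else
  let lvl : Int := if n > 2 * acc.2 then acc.2 + 1 else PySem.Int.floordiv n 2
  (acc.1 ++ [PySem.List.pyRepeat [' ', ' '] lvl ++ PySem.Chars.lstrip line], lvl)

def fix_yaml_indentation_alt (content : String) : String :=
  let lines := PySem.Chars.splitOn content.toList ['\n']
  let r := lines.foldl pvStepB ([], 0)
  String.mk (PySem.Chars.join ['\n'] r.1)

-- ===== PRECONDITION & SPEC =====
def Spec_fix_yaml_indentation (content : String) (out : String) : Prop := out = fix_yaml_indentation_alt content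
instance (content : String) (out : String) : Decidable (Spec_fix_yaml_indentation content out) := by unfold Spec_fix_yaml_indentation; infer_instance

-- ===== CLAIM (what is proved, stated in full; the proofs are below) =====
def Claim_equal_fix_yaml_indentation : Prop := ∀ (content : String), Dom_fix_yaml_indentation content → Spec_fix_yaml_indentation content (fix_yaml_indentation content)

-- ===== LEMMAS AND PROOFS =====

-- the only stacks A can hold: [2*(n-1), ..., 2, 0] (top at head), n >= 1
def pvStackOf : Nat → List Int
  | 0 => []
  | n + 1 => (2 * n : Int) :: pvStackOf n

theorem pvStackOf_length (n : Nat) : (pvStackOf n).length = n := by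
  induction n with
  | zero => rfl
  | succ n ih => simp [pvStackOf, ih]

theorem pvStackOf_headD (n : Nat) : (pvStackOf (n + 1)).headD 0 = (2 * n : Int) := rfl

-- popping the canonical stack lands at floor(L/2)+1 (clamped to the current depth)
theorem pvPop_min (L : Int) (hL : 0 ≤ L) (n : Nat) (hn : 1 ≤ n) :
    pvPopStackA L (pvStackOf n) = pvStackOf (min n (L.toNat / 2 + 1)) := by
  induction n with
  | zero => omega
  | succ m ih =>
    match m, ih with
    | 0, _ =>
      simp [pvStackOf, pvPopStackA]
    | m' + 1, ih =>
      by_cases hc : L < 2 * ((m' + 1 : Nat) : Int)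
      · have h1 : pvPopStackA L (pvStackOf (m' + 1 + 1)) = pvPopStackA L (pvStackOf (m' + 1)) := by
          simp only [pvStackOf]
          rw [pvPopStackA, if_pos (by exact_mod_cast hc)]
        rw [h1, ih (by omega)]
        have hle : L.toNat / 2 + 1 ≤ m' + 1 := by
          have : L.toNat < 2 * (m' + 1) := by omega
          omega
        rw [min_eq_right hle, min_eq_right (by omega)]
      · have hge : L.toNat / 2 + 1 ≥ m' + 1 + 1 := by
          have : 2 * (m' + 1) ≤ L.toNat := by omega
          omega
        rw [min_eq_left (by omega)]
        simp only [pvStackOf]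
        rw [pvPopStackA, if_neg (by exact_mod_cast hc)]

theorem pvFloordiv_toNat (L : Int) (hL : 0 ≤ L) :
    PySem.Int.floordiv L 2 = ((L.toNat / 2 : Nat) : Int) := by
  have h : L = ((L.toNat : Nat) : Int) := by omega
  rw [h]
  exact_mod_cast PySem.Int.floordiv_natCast L.toNat 2

-- invariant: A's stack is pvStackOf n (n ≥ 1) exactly when B's prev is n-1
theorem pvStep_agree (fixed : List (List Char)) (n : Nat) (hn : 1 ≤ n) (line : List Char) :
    ∃ m : Nat, 1 ≤ m ∧
      pvStepA (fixed, pvStackOf n) line = ((pvStepB (fixed, (n : Int) - 1) line).1, pvStackOf m) ∧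
      (pvStepB (fixed, (n : Int) - 1) line).2 = (m : Int) - 1 := by
  obtain ⟨n', rfl⟩ : ∃ n', n = n' + 1 := ⟨n - 1, by omega⟩
  have hprev : ((n' + 1 : Nat) : Int) - 1 = ((n' : Nat) : Int) := by push_cast; ring
  unfold pvStepA pvStepB
  by_cases hemp : PySem.Chars.strip line = []
  · exact ⟨n' + 1, by omega, by simp [hemp], by simp [hemp]⟩
  · have hLnn : (0 : Int) ≤ PySem.Chars.len line - PySem.Chars.len (List.dropWhile (fun c => c == ' ') line) := by
      have := List.length_dropWhile_le (p := fun c => c == ' ') (l := line)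
      simp only [PySem.Chars.len]
      omega
    by_cases h0 : PySem.Chars.len line - PySem.Chars.len (List.dropWhile (fun c => c == ' ') line) = 0
    · have h0' : ((line.length : Int) - ((List.dropWhile (fun c => c == ' ') line).length : Int)) = 0 := by
        simpa using h0
      exact ⟨1, le_rfl, by simp [hemp, h0', pvStackOf], by simp [hemp, h0']⟩
    · simp only [if_neg hemp, if_neg h0, ite_self, pvStackOf_headD, pvStackOf_length, hprev]
      set L : Int := PySem.Chars.len line - PySem.Chars.len (List.dropWhile (fun c => c == ' ') line) with hL
      by_cases hgt : L > 2 * ((n' : Nat) : Int)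
      · refine ⟨n' + 1 + 1, by omega, ?_, ?_⟩
        · simp only [if_pos hgt, pvStackOf, Prod.mk.injEq, List.cons.injEq]
          refine ⟨by norm_cast, by push_cast; ring, trivial⟩
        · simp only [if_pos hgt]
          push_cast; ring
      · have hdiv : PySem.Int.floordiv L 2 = ((L.toNat / 2 : Nat) : Int) := pvFloordiv_toNat L hLnn
        have hle2 : L.toNat / 2 + 1 ≤ n' + 1 := by
          have : L.toNat ≤ 2 * n' := by omega
          omega
        have hmin : min (n' + 1) (L.toNat / 2 + 1) = L.toNat / 2 + 1 := min_eq_right hle2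
        by_cases heq : L = 2 * ((n' : Nat) : Int)
        · have hhalf : L.toNat / 2 = n' := by omega
          refine ⟨n' + 1, by omega, ?_, ?_⟩
          · have hif : ¬ 2 * ((n' : Nat) : Int) < L := by omega
            simp only [if_neg hif, if_pos heq, hdiv, hhalf]
          · simp only [if_neg hgt, hdiv, hhalf]
            push_cast; ring
        · have hlt : L < 2 * ((n' : Nat) : Int) := by omega
          have hpop := pvPop_min L hLnn (n' + 1) (by omega)
          rw [hmin] at hpop
          refine ⟨L.toNat / 2 + 1, by omega, ?_, ?_⟩
          · simp only [if_neg hgt, if_neg heq, hpop, pvStackOf_length, hdiv, Prod.mk.injEq]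
            refine ⟨by push_cast; norm_num, trivial⟩
          · simp only [if_neg hgt, hdiv]
            push_cast; ring
      
theorem pvFold_agree (lines : List (List Char)) (fixed : List (List Char)) (n : Nat) (hn : 1 ≤ n) :
    (lines.foldl pvStepA (fixed, pvStackOf n)).1 = (lines.foldl pvStepB (fixed, (n : Int) - 1)).1 := by
  induction lines generalizing fixed n with
  | nil => rfl
  | cons l ls ih =>
    obtain ⟨m, hm1, hS, hD⟩ := pvStep_agree fixed n hn l
    simp only [List.foldl_cons, hS]
    have hpair : (pvStepB (fixed, (n : Int) - 1) l) = ((pvStepB (fixed, (n : Int) - 1) l).1, (m : Int) - 1) := by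
      rw [← hD]
    rw [hpair]
    exact ih _ m hm1

-- ===== VERDICT (by name: the statement is the Claim_ definition above) =====
theorem fix_yaml_indentation_spec : Claim_equal_fix_yaml_indentation := by
  intro content _
  unfold Spec_fix_yaml_indentation fix_yaml_indentation fix_yaml_indentation_alt
  have h1 : pvStackOf 1 = [0] := by norm_num [pvStackOf]
  have h := pvFold_agree (PySem.Chars.splitOn content.toList ['\n']) [] 1 (le_refl 1)
  rw [h1] at h
  simp only [Nat.cast_one, sub_self] at h
  simp only [h]
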